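-- pv_equiv track=rewrite | github.com/jeffmahoney/python-linux-keyring | src/linux_keyring/libkeyutils.py | _build_perm_mask
-- ===== SOURCE A (Python) =====
-- from typing import Dict, TypeVar, Optional
--
-- _PERM_FLAGS: Dict[str,  int] = {"v": 0x01, "r": 0x02, "w": 0x04, "x": 0x08, "l": 0x10, "a": 0x20}
--
-- _SET_SHIFT: Dict[str,  int] = {"p": 24, "u": 16, "g": 8, "o": 0}
--
-- def _build_perm_mask(clauses: list[str]) -> int:  # pylint: disable=too-many-branches
--     """Build 32-bit key permission mask from chmod-like clauses.
--     who: p,u,g,o; ops: +,-,= ; perms: v,r,w,x,l,a or 'all'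
--     """
--     mask = 0
--     for c in clauses:
--         c = c.strip()
--         if not c:
--             continue
--         i = 0
--         who = []
--         while i < len(c) and c[i] in "pugo":
--             who.append(c[i])
--             i += 1
--         if not who:
--             who = list("pugo")
--         if i >= len(c) or c[i] not in "+-=":
--             raise ValueError(f"Invalid clause '{c}'")
--         op = c[i]
--         i += 1
--         spec = c[i:]
--         if not spec:
--             bits = 0
--         elif spec == "all":
--             bits = 0
--             for b in _PERM_FLAGS.values():
--                 bits |= b
--         else:
--             bits = 0
--             for ch in spec:
--                 if ch not in _PERM_FLAGS:
--                     raise ValueError(f"Unknown perm '{ch}' in '{c}'")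
--                 bits |= _PERM_FLAGS[ch]
--         for w in who:
--             shift = _SET_SHIFT[w]
--             cur = (mask >> shift) & 0x3F
--             if op == "=":
--                 newb = bits
--             elif op == "+":
--                 newb = cur | bits
--             elif op == "-":
--                 newb = cur & (~bits & 0x3F)
--             else:
--                 raise ValueError(f"Unknown op '{op}' in '{c}'")
--             mask &= ~(0x3F << shift)
--             mask |= (newb & 0x3F) << shift
--     return mask
-- ===== SOURCE B (Python) =====
-- _PERM_FLAGS = {"v": 0x01, "r": 0x02, "w": 0x04, "x": 0x08, "l": 0x10, "a": 0x20}
--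
-- _SET_SHIFT = {"p": 24, "u": 16, "g": 8, "o": 0}
--
--
-- def _build_perm_mask(clauses: list[str]) -> int:
--     """Two staged passes: parse every clause first, then resolve each of the 24
--     (who, flag) bits independently by scanning the parsed clauses BACKWARDS for
--     the last operation that decides that bit ('=' always decides it; '+'/'-'
--     decide it only when the flag is in their spec)."""
--     parsed = []
--     for c in clauses:
--         c = c.strip()
--         if not c:
--             continue
--         j = 0
--         while j < len(c) and c[j] in "pugo":
--             j += 1
--         if j >= len(c) or c[j] not in "+-=":
--             raise ValueError(f"Invalid clause '{c}'")
--         who = c[:j] or "pugo"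
--         op = c[j]
--         spec = c[j + 1:]
--         if spec == "all":
--             bits = 0x3F
--         else:
--             bits = 0
--             for ch in spec:
--                 if ch not in _PERM_FLAGS:
--                     raise ValueError(f"Unknown perm '{ch}' in '{c}'")
--                 bits |= _PERM_FLAGS[ch]
--         parsed.append((who, op, bits))
--     mask = 0
--     for w, shift in _SET_SHIFT.items():
--         for flag in _PERM_FLAGS.values():
--             for who, op, bits in reversed(parsed):
--                 if w not in who:
--                     continue
--                 if op == "=":
--                     if bits & flag:
--                         mask |= flag << shift
--                     break
--                 if bits & flag:
--                     if op == "+":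
--                         mask |= flag << shift
--                     break
--     return mask
-- ===== Notes on version B (the rewrite author's own statement) =====
-- stated objective: alternative
-- what changed: B replaces A's single forward pass that mutates a packed 32-bit mask clause by clause with two staged passes: it first parses all clauses into (who, op, bits) triples, then computes each of the 24 (who, flag) result bits independently by scanning the parsed clauses backwards for the last operation that decides that bit ('=' always decides; '+'/'-' only when the flag is in their spec), OR-ing decided bits into a fresh mask.
import Mathlib
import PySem

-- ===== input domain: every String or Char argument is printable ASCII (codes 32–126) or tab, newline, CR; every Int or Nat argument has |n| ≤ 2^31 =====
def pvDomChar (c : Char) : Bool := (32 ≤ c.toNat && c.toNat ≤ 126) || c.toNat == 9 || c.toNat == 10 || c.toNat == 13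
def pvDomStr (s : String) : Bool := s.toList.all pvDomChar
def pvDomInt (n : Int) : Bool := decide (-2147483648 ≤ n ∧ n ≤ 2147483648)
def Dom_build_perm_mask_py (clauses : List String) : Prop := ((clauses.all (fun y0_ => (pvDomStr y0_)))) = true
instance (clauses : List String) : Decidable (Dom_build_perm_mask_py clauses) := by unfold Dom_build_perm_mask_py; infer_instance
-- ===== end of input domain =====

-- B replaces A's single forward pass mutating a packed 32-bit mask with two staged passes:
-- parse all clauses into (who, op, bits) triples first, then resolve each of the 24
-- (who, flag) result bits independently by scanning the parsed clauses backwards for the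
-- last operation that decides that bit (objective: alternative).

-- shared module constants (_PERM_FLAGS / _SET_SHIFT; shift values ported as the Nat shift amounts)
def pvPermFlags : PySem.Dict Char Int :=
  PySem.Dict.ofList [('v', 1), ('r', 2), ('w', 4), ('x', 8), ('l', 16), ('a', 32)]

def pvSetShift : PySem.Dict Char Nat :=
  PySem.Dict.ofList [('p', 24), ('u', 16), ('g', 8), ('o', 0)]

-- ===== PORT A =====  (none = the ValueError raises of A)
def pvSpecBitsA (spec : List Char) : Option Int :=
  if spec = [] then some 0
  else if spec = ['a', 'l', 'l'] then
    some (pvPermFlags.values.foldl (fun bits b => PySem.Int.bor bits b) 0)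
  else
    spec.foldlM (fun bits ch =>
      match pvPermFlags.get? ch with
      | none => none
      | some v => some (PySem.Int.bor bits v)) 0

def pvWhoStepA (op : Char) (bits mask : Int) (w : Char) : Option Int :=
  let shift := pvSetShift.getD w 0
  let cur := PySem.Int.band (mask >>> shift) 63
  let newb? : Option Int :=
    if op = '=' then some bits
    else if op = '+' then some (PySem.Int.bor cur bits)
    else if op = '-' then some (PySem.Int.band cur (PySem.Int.band (Int.not bits) 63))
    else none
  match newb? with
  | none => none
  | some newb =>
      some (PySem.Int.bor (PySem.Int.band mask (Int.not ((63 : Int) <<< shift)))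
        (PySem.Int.band newb 63 <<< shift))

def pvClauseA (mask : Int) (c0 : String) : Option Int :=
  let c := (PySem.Str.strip c0).toList
  if c = [] then some mask
  else
    let who0 := c.takeWhile (fun ch => ch ∈ ['p', 'u', 'g', 'o'])
    let who := if who0 = [] then ['p', 'u', 'g', 'o'] else who0
    match c.drop who0.length with
    | [] => none
    | op :: spec =>
      if op ∈ ['+', '-', '='] then
        match pvSpecBitsA spec with
        | none => none
        | some bits => who.foldlM (fun m w => pvWhoStepA op bits m w) mask
      else none

def build_perm_mask_py (clauses : List String) : Int :=
  (clauses.foldlM pvClauseA 0).getD 0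

-- ===== PORT B =====  (pass 1: parse every clause into (who, op, bits); none = ValueError)
def pvSpecBitsB (spec : List Char) : Option Int :=
  if spec = ['a', 'l', 'l'] then some 63
  else
    spec.foldlM (fun bits ch =>
      match pvPermFlags.get? ch with
      | none => none
      | some v => some (PySem.Int.bor bits v)) 0

def pvParseB (acc : List (List Char × Char × Int)) (c0 : String) :
    Option (List (List Char × Char × Int)) :=
  let c := (PySem.Str.strip c0).toList
  if c = [] then some acc
  else
    let j := (c.takeWhile (fun ch => ch ∈ ['p', 'u', 'g', 'o'])).length
    match c.drop j with
    | [] => none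
    | op :: spec =>
      if op ∈ ['+', '-', '='] then
        let who := if j = 0 then ['p', 'u', 'g', 'o'] else c.take j
        match pvSpecBitsB spec with
        | none => none
        | some bits => some (acc ++ [(who, op, bits)])
      else none

-- pass 2 inner loop: scan the parsed clauses backwards (the list is already reversed) for
-- the last operation deciding bit `flag` of who `w`; `break` = returning without recursing
def pvBitLoopB (w : Char) (flag : Int) (shift : Nat) :
    List (List Char × Char × Int) → Int → Int
  | [], mask => mask
  | (who, op, bits) :: rest, mask =>
    if w ∈ who then
      if op = '=' then
        (if PySem.Int.band bits flag ≠ 0 then PySem.Int.bor mask (flag <<< shift) else mask)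
      else if PySem.Int.band bits flag ≠ 0 then
        (if op = '+' then PySem.Int.bor mask (flag <<< shift) else mask)
      else pvBitLoopB w flag shift rest mask
    else pvBitLoopB w flag shift rest mask

def build_perm_mask_py_alt (clauses : List String) : Int :=
  match clauses.foldlM pvParseB [] with
  | none => 0
  | some parsed =>
    pvSetShift.items.foldl (fun mask ws =>
      pvPermFlags.values.foldl (fun mask flag =>
        pvBitLoopB ws.1 flag ws.2 parsed.reverse mask) mask) 0

-- ===== PRECONDITION & SPEC =====
-- Pre_ excludes exactly the inputs on which A raises ValueError: a stripped non-empty clause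
-- whose greedy [pugo]* prefix is not followed by an op in "+-=", or whose spec part is neither
-- empty, nor "all", nor made only of the perm letters v r w x l a.
def pvValidClause (c : List Char) : Bool :=
  c.isEmpty ||
    (match c.dropWhile (fun ch => ch ∈ ['p', 'u', 'g', 'o']) with
     | [] => false
     | op :: spec =>
       op ∈ ['+', '-', '='] &&
         (spec = ['a', 'l', 'l'] || spec.all (fun ch => ch ∈ ['v', 'r', 'w', 'x', 'l', 'a'])))

def Pre_build_perm_mask_py (clauses : List String) : Prop :=
  ∀ c ∈ clauses, pvValidClause (PySem.Str.strip c).toList = true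
instance (clauses : List String) : Decidable (Pre_build_perm_mask_py clauses) := by
  unfold Pre_build_perm_mask_py; infer_instance

def pvWitness_build_perm_mask_py : List String := ["u+rw", "g=all", " o-x ", "", "p+v"]

def Spec_build_perm_mask_py (clauses : List String) (out : Int) : Prop :=
  out = build_perm_mask_py_alt clauses
instance (clauses : List String) (out : Int) : Decidable (Spec_build_perm_mask_py clauses out) := by
  unfold Spec_build_perm_mask_py; infer_instance

-- ===== CLAIM (what is proved, stated in full; the proofs are below) =====
def Claim_equal_build_perm_mask_py : Prop :=
  ∀ (clauses : List String), Dom_build_perm_mask_py clauses →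
    Pre_build_perm_mask_py clauses →
      Spec_build_perm_mask_py clauses (build_perm_mask_py clauses)

-- ===== LEMMAS AND PROOFS =====

-- ---- the abstract forward semantics both programs are measured against ----
-- pvUpd is A's per-who 6-bit update in Nat form; pvEval folds it clause by clause.
def pvUpd (op : Char) (cur bits : Nat) : Nat :=
  if op = '=' then bits else if op = '+' then cur ||| bits else cur &&& (63 - (63 &&& bits))

def pvCStep (w : Char) (cur : Nat) (e : List Char × Char × Int) : Nat :=
  e.1.foldl (fun c x => if x = w then pvUpd e.2.1 c e.2.2.toNat else c) cur

def pvEval (w : Char) (cur : Nat) (P : List (List Char × Char × Int)) : Nat :=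
  P.foldl (pvCStep w) cur

def pvGoodE (e : List Char × Char × Int) : Prop :=
  (∀ x ∈ e.1, x ∈ (['p', 'u', 'g', 'o'] : List Char)) ∧
    e.2.1 ∈ (['+', '-', '='] : List Char) ∧ ∃ b : Nat, b < 64 ∧ e.2.2 = (b : Int)

def pvPack (p u g o : Nat) : Int := ((p * 16777216 + u * 65536 + g * 256 + o : Nat) : Int)

-- B's backward per-bit resolution, abstractly (d = the value when no clause decides the bit)
def pvResolve (w : Char) (k : Nat) (d : Bool) :
    List (List Char × Char × Int) → Bool
  | [] => d
  | (who, op, bits) :: rest =>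
    if w ∈ who then
      if op = '=' then bits.toNat.testBit k
      else if bits.toNat.testBit k then op == '+'
      else pvResolve w k d rest
    else pvResolve w k d rest

-- ---- generic Nat bit-arithmetic facts ----
theorem pvAnd63 (x : Nat) : x &&& 63 = x % 64 := Nat.and_two_pow_sub_one_eq_mod x 6

theorem pvOrLt {x y : Nat} (hx : x < 64) (hy : y < 64) : x ||| y < 64 :=
  Nat.or_lt_two_pow (n := 6) hx hy

theorem pvAndShift (a b s : Nat) : a &&& (b <<< s) = ((a >>> s) &&& b) <<< s := by
  apply Nat.eq_of_testBit_eq; intro i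
  simp only [Nat.testBit_and, Nat.testBit_shiftLeft, Nat.testBit_shiftRight]
  by_cases hs : s ≤ i
  · simp only [ge_iff_le, hs, decide_true, Bool.true_and]
    rw [Nat.add_sub_cancel' hs]
  · simp [hs]

theorem pvOrAdd : ∀ (x y : Nat), x &&& y = 0 → x ||| y = x + y := by
  intro x
  induction x using Nat.strong_induction_on with
  | _ x ih =>
    intro y h
    rcases Nat.eq_zero_or_pos x with hx | hx
    · simp [hx]
    · have hd : x / 2 &&& y / 2 = 0 := by rw [← Nat.and_div_two, h]
      have ih2 := ih (x / 2) (Nat.div_lt_self hx (by omega)) (y / 2) hd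
      have hb' : ((x ||| y) % 2 = 1) ↔ (x % 2 = 1 ∨ y % 2 = 1) := by
        have := Nat.testBit_or x y 0
        simp only [Nat.testBit_zero, ← Bool.decide_or, decide_eq_decide] at this
        exact this
      have hb2' : ¬(x % 2 = 1 ∧ y % 2 = 1) := by
        have := Nat.testBit_and x y 0
        rw [h] at this
        simp only [Nat.testBit_zero, ← Bool.decide_and, Nat.zero_mod] at this
        simpa using this.symm
      have e1 : x ||| y = 2 * ((x ||| y) / 2) + (x ||| y) % 2 := by omega
      rw [Nat.or_div_two] at e1
      omega

theorem pvDisj (y nb : Nat) (hy : y % 64 = 0) (hnb : nb < 64) : y &&& nb = 0 := by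
  have h1 : 63 &&& nb = nb := by rw [Nat.and_comm, pvAnd63]; omega
  calc y &&& nb = y &&& (63 &&& nb) := by rw [h1]
    _ = (y &&& 63) &&& nb := (Nat.and_assoc y 63 nb).symm
    _ = 0 &&& nb := by rw [pvAnd63, hy]
    _ = 0 := Nat.zero_and nb

theorem pvUpdGen (pk f nb s e : Nat) (he : (2 : Nat) ^ s = e)
    (hf : pk / e % 64 = f) (hd : (pk - f * e) / e % 64 = 0) (hnb : nb < 64) :
    (pk - (pk &&& (63 <<< s))) ||| (nb <<< s) = pk - f * e + nb * e := by
  have hA : pk &&& (63 <<< s) = f * e := by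
    rw [pvAndShift, Nat.shiftRight_eq_div_pow, he, pvAnd63, hf, Nat.shiftLeft_eq, he]
  have hdisj : (pk - f * e) &&& (nb <<< s) = 0 := by
    rw [pvAndShift (pk - f * e) nb s, Nat.shiftRight_eq_div_pow, he,
        pvDisj _ _ hd hnb, Nat.zero_shiftLeft]
  rw [hA, pvOrAdd _ _ hdisj, Nat.shiftLeft_eq, he]

-- ---- Int/Nat bridges for the Python bit operators ----
theorem pvBandNotL (m k : Nat) :
    PySem.Int.band (Int.not (k : Int)) (m : Int) = ((m - (m &&& k) : Nat) : Int) := by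
  simp [PySem.Int.band, Int.not]

theorem pvBandNot (m k : Nat) :
    PySem.Int.band (m : Int) (Int.not (k : Int)) = ((m - (m &&& k) : Nat) : Int) := by
  simp [PySem.Int.band, Int.not]

theorem pvCurEq (pk f s e : Nat) (he : (2 : Nat) ^ s = e) (hf : pk / e % 64 = f) :
    PySem.Int.band (((pk : Nat) : Int) >>> s) 63 = ((f : Nat) : Int) := by
  have h0 : (((pk : Nat) : Int) >>> s) = ((pk >>> s : Nat) : Int) := rfl
  have h1 : PySem.Int.band ((pk >>> s : Nat) : Int) 63 = (((pk >>> s) &&& 63 : Nat) : Int) := by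
    exact_mod_cast PySem.Int.band_natCast (pk >>> s) 63
  rw [h0, h1, Nat.shiftRight_eq_div_pow, he, pvAnd63, hf]

theorem pvMaskUpdate (pk f nb s e : Nat) (he : (2 : Nat) ^ s = e)
    (hf : pk / e % 64 = f) (hd : (pk - f * e) / e % 64 = 0) (hnb : nb < 64) :
    PySem.Int.bor (PySem.Int.band (pk : Int) (Int.not ((63 : Int) <<< s)))
      (PySem.Int.band (nb : Int) 63 <<< s) = ((pk - f * e + nb * e : Nat) : Int) := by
  have h0 : ((63 : Int) <<< s) = (((63 <<< s : Nat) : Nat) : Int) := rfl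
  rw [h0, pvBandNot]
  have h1 : PySem.Int.band (nb : Int) 63 = ((nb &&& 63 : Nat) : Int) := by
    exact_mod_cast PySem.Int.band_natCast nb 63
  have h2 : nb &&& 63 = nb := by rw [pvAnd63]; omega
  rw [h1, h2]
  have h3 : ((nb : Nat) : Int) <<< s = ((nb <<< s : Nat) : Int) := rfl
  rw [h3, PySem.Int.bor_natCast, pvUpdGen pk f nb s e he hf hd hnb]

-- ---- per-char prefix parsing facts ----
theorem pvDropTake (c : List Char) (p : Char → Bool) :
    c.drop (c.takeWhile p).length = c.dropWhile p := by
  have h := List.takeWhile_append_dropWhile (p := p) (l := c)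
  generalize hq : c.takeWhile p = t at *
  generalize hr : c.dropWhile p = d at *
  subst h
  rw [List.drop_left]

theorem pvTakeTake (c : List Char) (p : Char → Bool) :
    c.take (c.takeWhile p).length = c.takeWhile p := by
  have h := List.takeWhile_append_dropWhile (p := p) (l := c)
  generalize hq : c.takeWhile p = t at *
  generalize hr : c.dropWhile p = d at *
  subst h
  rw [List.take_left]

-- ---- bounds for pvUpd / pvEval ----
theorem pvUpdLt (op : Char) (cur b : Nat) (hc : cur < 64) (hb : b < 64) :
    pvUpd op cur b < 64 := by
  unfold pvUpd
  split_ifs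
  · exact hb
  · exact pvOrLt hc hb
  · exact Nat.lt_of_le_of_lt Nat.and_le_left hc

theorem pvCStepLt (w : Char) (e : List Char × Char × Int) (hG : pvGoodE e) :
    ∀ cur, cur < 64 → pvCStep w cur e < 64 := by
  obtain ⟨-, -, b, hb, hbe⟩ := hG
  unfold pvCStep
  generalize e.1 = who
  induction who with
  | nil => exact fun cur h => h
  | cons x rest ih =>
    intro cur h
    rw [List.foldl_cons]
    apply ih
    by_cases hx : x = w
    · rw [if_pos hx]
      exact pvUpdLt _ _ _ h (by rw [hbe]; simpa using hb)
    · rwa [if_neg hx]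

theorem pvEvalLt (w : Char) (P : List (List Char × Char × Int)) (hG : ∀ e ∈ P, pvGoodE e) :
    ∀ cur, cur < 64 → pvEval w cur P < 64 := by
  induction P with
  | nil => exact fun cur h => h
  | cons e rest ih =>
    intro cur h
    rw [pvEval, List.foldl_cons]
    exact ih (fun x hx => hG x (by simp [hx])) _ (pvCStepLt w e (hG e (by simp)) cur h)

-- ---- the per-spec bits agree and are a 6-bit value ----
theorem pvBitsFold (spec : List Char) (hs : ∀ ch ∈ spec, ch ∈ (['v','r','w','x','l','a'] : List Char)) :
    ∀ b : Nat, b < 64 → ∃ nb : Nat, nb < 64 ∧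
      spec.foldlM (fun bits ch =>
        match pvPermFlags.get? ch with
        | none => none
        | some v => some (PySem.Int.bor bits v)) ((b : Nat) : Int) = some ((nb : Nat) : Int) := by
  induction spec with
  | nil => intro b hb; exact ⟨b, hb, rfl⟩
  | cons ch rest ih =>
    intro b hb
    have hch : ch ∈ (['v','r','w','x','l','a'] : List Char) := hs ch (by simp)
    have hrest : ∀ c ∈ rest, c ∈ (['v','r','w','x','l','a'] : List Char) :=
      fun c hc => hs c (by simp [hc])
    rw [List.foldlM_cons]
    fin_cases hch
    · have h : pvPermFlags.get? 'v' = some ((1 : Nat) : Int) := by decide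
      rw [h]
      simpa [PySem.Int.bor_natCast] using ih hrest (b ||| 1) (pvOrLt hb (by omega))
    · have h : pvPermFlags.get? 'r' = some ((2 : Nat) : Int) := by decide
      rw [h]
      simpa [PySem.Int.bor_natCast] using ih hrest (b ||| 2) (pvOrLt hb (by omega))
    · have h : pvPermFlags.get? 'w' = some ((4 : Nat) : Int) := by decide
      rw [h]
      simpa [PySem.Int.bor_natCast] using ih hrest (b ||| 4) (pvOrLt hb (by omega))
    · have h : pvPermFlags.get? 'x' = some ((8 : Nat) : Int) := by decide
      rw [h]
      simpa [PySem.Int.bor_natCast] using ih hrest (b ||| 8) (pvOrLt hb (by omega))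
    · have h : pvPermFlags.get? 'l' = some ((16 : Nat) : Int) := by decide
      rw [h]
      simpa [PySem.Int.bor_natCast] using ih hrest (b ||| 16) (pvOrLt hb (by omega))
    · have h : pvPermFlags.get? 'a' = some ((32 : Nat) : Int) := by decide
      rw [h]
      simpa [PySem.Int.bor_natCast] using ih hrest (b ||| 32) (pvOrLt hb (by omega))

theorem pvBits (spec : List Char)
    (hv : spec = ['a','l','l'] ∨ ∀ ch ∈ spec, ch ∈ (['v','r','w','x','l','a'] : List Char)) :
    ∃ nb : Nat, nb < 64 ∧ pvSpecBitsA spec = some ((nb : Nat) : Int) ∧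
      pvSpecBitsB spec = some ((nb : Nat) : Int) := by
  rcases hv with h | h
  · subst h
    exact ⟨63, by omega, by decide, by decide⟩
  · by_cases hall : spec = ['a','l','l']
    · subst hall
      exact ⟨63, by omega, by decide, by decide⟩
    · by_cases hemp : spec = []
      · subst hemp
        exact ⟨0, by omega, by decide, by decide⟩
      · obtain ⟨nb, hnb, hfold⟩ := pvBitsFold spec h 0 (by omega)
        refine ⟨nb, hnb, ?_, ?_⟩
        · unfold pvSpecBitsA
          rw [if_neg hemp, if_neg hall]
          simpa using hfold
        · unfold pvSpecBitsB
          rw [if_neg hall]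
          simpa using hfold

-- ---- A's per-who-char step = pvUpd on one component of the packed quadruple ----
theorem pvNewbEq (op : Char) (hop : op ∈ (['+', '-', '='] : List Char)) (cur b : Nat) :
    (if op = '=' then some ((b : Nat) : Int)
     else if op = '+' then some (PySem.Int.bor ((cur : Nat) : Int) ((b : Nat) : Int))
     else if op = '-' then
       some (PySem.Int.band ((cur : Nat) : Int) (PySem.Int.band (Int.not ((b : Nat) : Int)) 63))
     else none) = some ((pvUpd op cur b : Nat) : Int) := by
  fin_cases hop
  · simp [pvUpd, PySem.Int.bor_natCast]
  · have h63 : PySem.Int.band (Int.not ((b : Nat) : Int)) 63 = ((63 - (63 &&& b) : Nat) : Int) := by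
      simpa using pvBandNotL 63 b
    simp [pvUpd, h63, PySem.Int.band_natCast]
  · simp [pvUpd]

theorem pvStepA (op : Char) (hop : op ∈ (['+', '-', '='] : List Char)) (b : Nat) (hb : b < 64)
    (w : Char) (hw : w ∈ (['p', 'u', 'g', 'o'] : List Char)) (p u g o : Nat)
    (hp : p < 64) (hu : u < 64) (hg : g < 64) (ho : o < 64) :
    pvWhoStepA op ((b : Nat) : Int) (pvPack p u g o) w =
      some (pvPack (if w = 'p' then pvUpd op p b else p) (if w = 'u' then pvUpd op u b else u)
        (if w = 'g' then pvUpd op g b else g) (if w = 'o' then pvUpd op o b else o)) := by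
  have hnb := pvUpdLt op
  fin_cases hw
  · simp only [pvWhoStepA, pvPack]
    rw [show pvSetShift.getD 'p' 0 = 24 from by decide,
        pvCurEq (p * 16777216 + u * 65536 + g * 256 + o) p 24 16777216 (by norm_num) (by omega),
        pvNewbEq op hop p b]
    dsimp only
    rw [pvMaskUpdate (p * 16777216 + u * 65536 + g * 256 + o) p (pvUpd op p b) 24 16777216
          (by norm_num) (by omega) (by omega) (hnb p b hp hb)]
    refine congrArg (fun n : Nat => some ((n : Int))) ?_
    simp only [Char.reduceEq, if_false, if_true]
    omega
  · simp only [pvWhoStepA, pvPack]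
    rw [show pvSetShift.getD 'u' 0 = 16 from by decide,
        pvCurEq (p * 16777216 + u * 65536 + g * 256 + o) u 16 65536 (by norm_num) (by omega),
        pvNewbEq op hop u b]
    dsimp only
    rw [pvMaskUpdate (p * 16777216 + u * 65536 + g * 256 + o) u (pvUpd op u b) 16 65536
          (by norm_num) (by omega) (by omega) (hnb u b hu hb)]
    refine congrArg (fun n : Nat => some ((n : Int))) ?_
    simp only [Char.reduceEq, if_false, if_true]
    omega
  · simp only [pvWhoStepA, pvPack]
    rw [show pvSetShift.getD 'g' 0 = 8 from by decide,
        pvCurEq (p * 16777216 + u * 65536 + g * 256 + o) g 8 256 (by norm_num) (by omega),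
        pvNewbEq op hop g b]
    dsimp only
    rw [pvMaskUpdate (p * 16777216 + u * 65536 + g * 256 + o) g (pvUpd op g b) 8 256
          (by norm_num) (by omega) (by omega) (hnb g b hg hb)]
    refine congrArg (fun n : Nat => some ((n : Int))) ?_
    simp only [Char.reduceEq, if_false, if_true]
    omega
  · simp only [pvWhoStepA, pvPack]
    rw [show pvSetShift.getD 'o' 0 = 0 from by decide,
        pvCurEq (p * 16777216 + u * 65536 + g * 256 + o) o 0 1 (by norm_num) (by omega),
        pvNewbEq op hop o b]
    dsimp only
    rw [pvMaskUpdate (p * 16777216 + u * 65536 + g * 256 + o) o (pvUpd op o b) 0 1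
          (by norm_num) (by omega) (by omega) (hnb o b ho hb)]
    refine congrArg (fun n : Nat => some ((n : Int))) ?_
    simp only [Char.reduceEq, if_false, if_true]
    omega

-- A's who-loop = componentwise folds
theorem pvWhoFoldA (op : Char) (hop : op ∈ (['+', '-', '='] : List Char)) (b : Nat) (hb : b < 64) :
    ∀ (who : List Char), (∀ x ∈ who, x ∈ (['p', 'u', 'g', 'o'] : List Char)) →
    ∀ p u g o : Nat, p < 64 → u < 64 → g < 64 → o < 64 →
      who.foldlM (fun m w => pvWhoStepA op ((b : Nat) : Int) m w) (pvPack p u g o) =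
        some (pvPack (who.foldl (fun c x => if x = 'p' then pvUpd op c b else c) p)
          (who.foldl (fun c x => if x = 'u' then pvUpd op c b else c) u)
          (who.foldl (fun c x => if x = 'g' then pvUpd op c b else c) g)
          (who.foldl (fun c x => if x = 'o' then pvUpd op c b else c) o)) := by
  intro who
  induction who with
  | nil => intro _ p u g o hp hu hg ho; rfl
  | cons x rest ih =>
    intro hmem p u g o hp hu hg ho
    rw [List.foldlM_cons, pvStepA op hop b hb x (hmem x (by simp)) p u g o hp hu hg ho]
    have h1 : (if x = 'p' then pvUpd op p b else p) < 64 := by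
      split; exacts [pvUpdLt op p b hp hb, hp]
    have h2 : (if x = 'u' then pvUpd op u b else u) < 64 := by
      split; exacts [pvUpdLt op u b hu hb, hu]
    have h3 : (if x = 'g' then pvUpd op g b else g) < 64 := by
      split; exacts [pvUpdLt op g b hg hb, hg]
    have h4 : (if x = 'o' then pvUpd op o b else o) < 64 := by
      split; exacts [pvUpdLt op o b ho hb, ho]
    have := ih (fun y hy => hmem y (by simp [hy])) _ _ _ _ h1 h2 h3 h4
    simpa [List.foldl_cons] using this

-- ---- joint clause processing: A's fold and B's pass 1 ----
theorem pvClauseJoint (c0 : String) (hv : pvValidClause (PySem.Str.strip c0).toList = true)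
    (p u g o : Nat) (hp : p < 64) (hu : u < 64) (hg : g < 64) (ho : o < 64)
    (acc : List (List Char × Char × Int)) :
    (pvClauseA (pvPack p u g o) c0 = some (pvPack p u g o) ∧ pvParseB acc c0 = some acc) ∨
      ∃ e, pvGoodE e ∧
        pvClauseA (pvPack p u g o) c0 =
          some (pvPack (pvCStep 'p' p e) (pvCStep 'u' u e) (pvCStep 'g' g e) (pvCStep 'o' o e)) ∧
        pvParseB acc c0 = some (acc ++ [e]) := by
  unfold pvClauseA pvParseB
  set c := (PySem.Str.strip c0).toList with hc
  by_cases hce : c = []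
  · rw [if_pos hce, if_pos hce]
    exact Or.inl ⟨rfl, rfl⟩
  · rw [if_neg hce, if_neg hce]
    unfold pvValidClause at hv
    have hni : c.isEmpty = false := by simpa using hce
    rw [hni] at hv
    dsimp only
    simp only [Bool.false_or] at hv
    rcases hdw : c.dropWhile (fun ch => decide (ch ∈ ['p', 'u', 'g', 'o'])) with _ | ⟨op, spec⟩
    · rw [hdw] at hv; simp at hv
    · rw [hdw] at hv
      simp only [Bool.and_eq_true, Bool.or_eq_true, decide_eq_true_eq, List.all_eq_true] at hv
      obtain ⟨hop, hspec⟩ := hv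
      have hdrop : c.drop (c.takeWhile (fun ch => decide (ch ∈ ['p', 'u', 'g', 'o']))).length
          = op :: spec := by rw [pvDropTake, hdw]
      rw [hdrop]
      dsimp only
      have hopl : op ∈ (['+', '-', '='] : List Char) := by simpa using hop
      rw [if_pos hopl, if_pos hopl]
      obtain ⟨nb, hnb, hbA, hbB⟩ := pvBits spec (by
        rcases hspec with h | h
        · exact Or.inl h
        · exact Or.inr (fun ch hch => by simpa using h ch hch))
      rw [hbA, hbB]
      dsimp only
      have htake : c.take (c.takeWhile (fun ch => decide (ch ∈ ['p', 'u', 'g', 'o']))).length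
          = c.takeWhile (fun ch => decide (ch ∈ ['p', 'u', 'g', 'o'])) := pvTakeTake c _
      have hlen : ((c.takeWhile (fun ch => decide (ch ∈ ['p', 'u', 'g', 'o']))).length = 0)
          ↔ (c.takeWhile (fun ch => decide (ch ∈ ['p', 'u', 'g', 'o']))) = [] :=
        List.length_eq_zero_iff
      set who0 := c.takeWhile (fun ch => decide (ch ∈ ['p', 'u', 'g', 'o'])) with hwho0
      set who : List Char := if who0 = [] then ['p', 'u', 'g', 'o'] else who0 with hwho
      have hwB : (if who0.length = 0 then (['p', 'u', 'g', 'o'] : List Char) else c.take who0.length)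
          = who := by
        by_cases hz : who0 = []
        · rw [if_pos (hlen.mpr hz), hwho, if_pos hz]
        · rw [if_neg (fun h => hz (hlen.mp h)), htake, hwho, if_neg hz]
      rw [hwB]
      have hwmem : ∀ x ∈ who, x ∈ (['p', 'u', 'g', 'o'] : List Char) := by
        intro x hx
        rw [hwho] at hx
        by_cases hz : who0 = []
        · rw [if_pos hz] at hx; simpa using hx
        · rw [if_neg hz] at hx
          have := List.mem_takeWhile_imp hx
          simpa using this
      refine Or.inr ⟨(who, op, ((nb : Nat) : Int)), ⟨hwmem, hopl, nb, hnb, rfl⟩, ?_, rfl⟩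
      rw [pvWhoFoldA op hopl nb hnb who hwmem p u g o hp hu hg ho]
      have hCS : ∀ (w : Char) (cur : Nat), pvCStep w cur (who, op, ((nb : Nat) : Int)) =
          who.foldl (fun cc x => if x = w then pvUpd op cc nb else cc) cur := by
        intro w cur
        simp [pvCStep]
      rw [hCS 'p' p, hCS 'u' u, hCS 'g' g, hCS 'o' o]

theorem pvMain : ∀ (clauses : List String),
    (∀ c ∈ clauses, pvValidClause (PySem.Str.strip c).toList = true) →
    ∀ (p u g o : Nat) (acc : List (List Char × Char × Int)),
      p < 64 → u < 64 → g < 64 → o < 64 →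
      ∃ P, (∀ e ∈ P, pvGoodE e) ∧
        clauses.foldlM pvParseB acc = some (acc ++ P) ∧
        clauses.foldlM pvClauseA (pvPack p u g o) =
          some (pvPack (pvEval 'p' p P) (pvEval 'u' u P) (pvEval 'g' g P) (pvEval 'o' o P)) := by
  intro clauses
  induction clauses with
  | nil =>
    intro _ p u g o acc hp hu hg ho
    exact ⟨[], by simp, by simp, by simp [pvEval]⟩
  | cons c cs ih =>
    intro hv p u g o acc hp hu hg ho
    rcases pvClauseJoint c (hv c (by simp)) p u g o hp hu hg ho acc with
      ⟨hA1, hB1⟩ | ⟨e, hGe, hA1, hB1⟩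
    · obtain ⟨P, hGP, hBP, hAP⟩ := ih (fun x hx => hv x (by simp [hx])) p u g o acc hp hu hg ho
      refine ⟨P, hGP, ?_, ?_⟩
      · rw [List.foldlM_cons, hB1]; simpa using hBP
      · rw [List.foldlM_cons, hA1]; simpa using hAP
    · obtain ⟨P, hGP, hBP, hAP⟩ := ih (fun x hx => hv x (by simp [hx]))
        (pvCStep 'p' p e) (pvCStep 'u' u e) (pvCStep 'g' g e) (pvCStep 'o' o e) (acc ++ [e])
        (pvCStepLt _ e hGe p hp) (pvCStepLt _ e hGe u hu)
        (pvCStepLt _ e hGe g hg) (pvCStepLt _ e hGe o ho)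
      refine ⟨e :: P, ?_, ?_, ?_⟩
      · intro x hx
        rcases List.mem_cons.mp hx with h | h
        · exact h ▸ hGe
        · exact hGP x h
      · rw [List.foldlM_cons, hB1]
        simpa using hBP
      · rw [List.foldlM_cons, hA1]
        simp only [pvEval, List.foldl_cons]
        simpa using hAP

-- ---- bit-level characterisation of pvUpd / pvCStep ----
def pvBitUpd (op : Char) (x y : Bool) : Bool :=
  if op = '=' then y else if op = '+' then x || y else x && !y

theorem pvBitUpdIdem (op : Char) (x y : Bool) :
    pvBitUpd op (pvBitUpd op x y) y = pvBitUpd op x y := by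
  unfold pvBitUpd
  split_ifs <;> cases x <;> cases y <;> rfl

theorem pv63Sub : ∀ (b' : Fin 64) (k : Fin 6),
    (63 - b'.val).testBit k.val = !b'.val.testBit k.val := by decide

theorem pvModBit (b k : Nat) (hk : k < 6) : (b % 64).testBit k = b.testBit k := by
  have : (64 : Nat) = 2 ^ 6 := by norm_num
  rw [this, Nat.testBit_mod_two_pow]
  simp [hk]

theorem pvUpdBit (op : Char) (cur b k : Nat) (hk : k < 6) :
    (pvUpd op cur b).testBit k = pvBitUpd op (cur.testBit k) (b.testBit k) := by
  unfold pvUpd pvBitUpd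
  split_ifs
  · rfl
  · exact Nat.testBit_or cur b k
  · rw [Nat.testBit_and]
    congr 1
    rw [Nat.and_comm, pvAnd63]
    have h1 := pv63Sub ⟨b % 64, by omega⟩ ⟨k, hk⟩
    simp only at h1
    rw [h1, pvModBit b k hk]

theorem pvCStepBit (w : Char) (cur : Nat) (e : List Char × Char × Int) (k : Nat) (hk : k < 6) :
    (pvCStep w cur e).testBit k =
      if w ∈ e.1 then pvBitUpd e.2.1 (cur.testBit k) (e.2.2.toNat.testBit k)
      else cur.testBit k := by
  obtain ⟨who, op, bits⟩ := e
  unfold pvCStep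
  dsimp only
  induction who generalizing cur with
  | nil => simp
  | cons x rest ih =>
    rw [List.foldl_cons]
    rw [ih]
    by_cases hx : x = w
    · subst hx
      rw [if_pos rfl]
      by_cases hm : x ∈ rest
      · rw [if_pos hm, if_pos (by simp [hm]), pvUpdBit op cur bits.toNat k hk, pvBitUpdIdem]
      · rw [if_neg hm, if_pos (by simp), pvUpdBit op cur bits.toNat k hk]
    · rw [if_neg hx]
      by_cases hm : w ∈ rest
      · rw [if_pos hm, if_pos (by simp [hm])]
      · rw [if_neg hm, if_neg (by simp [hm]; exact fun h => hx h.symm)]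

-- ---- forward fold = backward resolution, bit by bit ----
theorem pvEvalResolve (w : Char) (k : Nat) (hk : k < 6) :
    ∀ (P : List (List Char × Char × Int)) (cur : Nat),
      (pvEval w cur P).testBit k = pvResolve w k (cur.testBit k) P.reverse := by
  intro P
  induction P using List.reverseRecOn with
  | nil => intro cur; simp [pvEval, pvResolve]
  | append_singleton Q e ih =>
    intro cur
    rw [pvEval, List.foldl_append, List.reverse_append]
    simp only [List.foldl_cons, List.foldl_nil, List.reverse_cons, List.reverse_nil,
      List.nil_append, List.cons_append]
    rw [show Q.foldl (pvCStep w) cur = pvEval w cur Q from rfl]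
    rw [pvCStepBit w _ e k hk]
    obtain ⟨who, op, bits⟩ := e
    show _ = pvResolve w k (cur.testBit k) ((who, op, bits) :: Q.reverse)
    unfold pvResolve
    dsimp only
    by_cases hw : w ∈ who
    · rw [if_pos hw, if_pos hw]
      by_cases heq : op = '='
      · rw [if_pos heq]
        simp [pvBitUpd, heq]
      · rw [if_neg heq]
        by_cases hb : bits.toNat.testBit k
        · rw [if_pos hb]
          by_cases hplus : op = '+'
          · simp [pvBitUpd, hplus, hb]
          · simp [pvBitUpd, hplus, hb, heq]
        · rw [if_neg hb, ← ih cur]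
          simp only [Bool.not_eq_true] at hb
          by_cases hplus : op = '+'
          · simp [pvBitUpd, hplus, hb]
          · simp [pvBitUpd, hplus, hb]
            exact fun _ => heq
    · rw [if_neg hw, if_neg hw, ih cur]

-- ---- B's pass-2 inner loop = pvResolve, then OR-accumulation = addition ----
theorem pvLoopResolve (w : Char) (k s : Nat) (flag : Int) (hflag : flag = ((2 ^ k : Nat) : Int)) :
    ∀ (l : List (List Char × Char × Int)), (∀ e ∈ l, ∃ b : Nat, e.2.2 = (b : Int)) →
    ∀ m : Int, pvBitLoopB w flag s l m =
      if pvResolve w k false l then PySem.Int.bor m (flag <<< s) else m := by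
  intro l
  induction l with
  | nil => intro _ m; simp [pvBitLoopB, pvResolve]
  | cons e rest ih =>
    intro hbs m
    obtain ⟨who, op, bits⟩ := e
    obtain ⟨b, hb⟩ := hbs (who, op, bits) (by simp)
    simp only at hb
    have hband : PySem.Int.band bits flag = ((b &&& 2 ^ k : Nat) : Int) := by
      rw [hb, hflag, PySem.Int.band_natCast]
    have htn : bits.toNat = b := by rw [hb]; exact Int.toNat_natCast b
    have ihr := ih (fun e he => hbs e (by simp [he]))
    by_cases hbt : b.testBit k
    · have hne : PySem.Int.band bits flag ≠ 0 := by
        rw [hband, Nat.and_two_pow, hbt]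
        have : (0 : Nat) < 2 ^ k := Nat.two_pow_pos k
        simp only [Bool.toNat_true, one_mul]
        exact_mod_cast this.ne'
      by_cases hw : w ∈ who
      · by_cases heq : op = '='
        · simp [pvBitLoopB, pvResolve, hw, heq, htn, hbt, hne]
        · by_cases hplus : op = '+' <;>
            simp [pvBitLoopB, pvResolve, hw, heq, htn, hbt, hne, hplus]
      · simp [pvBitLoopB, pvResolve, hw, ihr m]
    · have hz : PySem.Int.band bits flag = 0 := by
        rw [hband, Nat.and_two_pow]
        simp only [Bool.not_eq_true] at hbt
        simp [hbt]
      by_cases hw : w ∈ who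
      · by_cases heq : op = '='
        · simp [pvBitLoopB, pvResolve, hw, heq, htn, hbt, hz]
        · simp [pvBitLoopB, pvResolve, hw, heq, htn, hbt, hz, ihr m]
      · simp [pvBitLoopB, pvResolve, hw, ihr m]

theorem pvTBit (c q s j : Nat) (hq : q < 2 ^ j) (hj : j < 6) :
    (c * 2 ^ (s + 6) + q * 2 ^ s).testBit (j + s) = false := by
  have h2 : (2 : Nat) ^ (s + 6) = 2 ^ (6 - j) * 2 ^ (j + s) := by
    rw [← pow_add]; congr 1; omega
  have hlt : q * 2 ^ s < 2 ^ (j + s) := by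
    rw [pow_add]
    exact (Nat.mul_lt_mul_right (Nat.two_pow_pos s)).mpr hq
  rw [Nat.testBit_eq_decide_div_mod_eq]
  have e1 : c * 2 ^ (s + 6) + q * 2 ^ s = 2 ^ (j + s) * (c * 2 ^ (6 - j)) + q * 2 ^ s := by
    rw [h2]; ring
  rw [e1, Nat.mul_add_div (Nat.two_pow_pos _), Nat.div_eq_of_lt hlt, Nat.add_zero]
  have e2 : c * 2 ^ (6 - j) % 2 = 0 := by
    have h3 : (2 : Nat) ^ (6 - j) = 2 ^ (5 - j) * 2 := by
      rw [← pow_succ]; congr 1; omega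
    rw [h3, ← mul_assoc]
    exact Nat.mul_mod_left _ 2
  simp [e2]

theorem pvStep6 (c q s j : Nat) (hq : q < 2 ^ j) (hj : j < 6) (r : Bool)
    (flag : Int) (hflag : flag = ((2 ^ j : Nat) : Int)) :
    (if r then PySem.Int.bor ((c * 2 ^ (s + 6) + q * 2 ^ s : Nat) : Int) (flag <<< s)
     else ((c * 2 ^ (s + 6) + q * 2 ^ s : Nat) : Int)) =
      ((c * 2 ^ (s + 6) + (q + (if r then 2 ^ j else 0)) * 2 ^ s : Nat) : Int) := by
  cases r
  · simp
  · rw [if_pos rfl, if_pos rfl]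
    subst hflag
    rw [show (((2 ^ j : Nat) : Int) <<< s) = ((2 ^ j <<< s : Nat) : Int) from rfl,
        PySem.Int.bor_natCast]
    have hand : (c * 2 ^ (s + 6) + q * 2 ^ s) &&& (2 ^ j <<< s) = 0 := by
      rw [Nat.shiftLeft_eq, ← pow_add, Nat.and_two_pow, pvTBit c q s j hq hj]
      simp
    rw [pvOrAdd _ _ hand]
    refine congrArg (fun n : Nat => (n : Int)) ?_
    rw [Nat.shiftLeft_eq, ← pow_add]
    rw [pow_add]
    ring

theorem pvBitsSum (v : Nat) (hv : v < 64) :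
    ((((((0 + if v.testBit 0 then 2 ^ 0 else 0) + if v.testBit 1 then 2 ^ 1 else 0)
      + if v.testBit 2 then 2 ^ 2 else 0) + if v.testBit 3 then 2 ^ 3 else 0)
      + if v.testBit 4 then 2 ^ 4 else 0) + if v.testBit 5 then 2 ^ 5 else 0) = v := by
  have h : ∀ b : Fin 64,
      ((((((0 + if b.val.testBit 0 then 2 ^ 0 else 0) + if b.val.testBit 1 then 2 ^ 1 else 0)
        + if b.val.testBit 2 then 2 ^ 2 else 0) + if b.val.testBit 3 then 2 ^ 3 else 0)
        + if b.val.testBit 4 then 2 ^ 4 else 0) + if b.val.testBit 5 then 2 ^ 5 else 0) = b.val := by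
    decide
  exact h ⟨v, hv⟩

-- inner flags loop over one who: adds (pvEval w 0 P) <<< s to a region-clean mask
theorem pvInner (w : Char) (s c : Nat) (P : List (List Char × Char × Int))
    (hG : ∀ e ∈ P, pvGoodE e) :
    pvPermFlags.values.foldl (fun mask flag => pvBitLoopB w flag s P.reverse mask)
        ((c * 2 ^ (s + 6) : Nat) : Int) =
      ((c * 2 ^ (s + 6) + pvEval w 0 P * 2 ^ s : Nat) : Int) := by
  have hbs : ∀ e ∈ P.reverse, ∃ b : Nat, e.2.2 = (b : Int) := by
    intro e he
    obtain ⟨-, -, b, -, hb⟩ := hG e (List.mem_reverse.mp he)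
    exact ⟨b, hb⟩
  have hvals : pvPermFlags.values = [1, 2, 4, 8, 16, 32] := by decide
  rw [hvals]
  simp only [List.foldl_cons, List.foldl_nil]
  rw [pvLoopResolve w 0 s 1 (by norm_num) P.reverse hbs,
      pvLoopResolve w 1 s 2 (by norm_num) P.reverse hbs,
      pvLoopResolve w 2 s 4 (by norm_num) P.reverse hbs,
      pvLoopResolve w 3 s 8 (by norm_num) P.reverse hbs,
      pvLoopResolve w 4 s 16 (by norm_num) P.reverse hbs,
      pvLoopResolve w 5 s 32 (by norm_num) P.reverse hbs]
  rw [show ((c * 2 ^ (s + 6) : Nat) : Int) = ((c * 2 ^ (s + 6) + 0 * 2 ^ s : Nat) : Int)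
      from by norm_num]
  rw [pvStep6 c 0 s 0 (by norm_num) (by norm_num) _ 1 (by norm_num)]
  rw [pvStep6 c _ s 1 (by split <;> norm_num) (by norm_num) _ 2 (by norm_num)]
  rw [pvStep6 c _ s 2 (by split <;> split <;> norm_num) (by norm_num) _ 4 (by norm_num)]
  rw [pvStep6 c _ s 3 (by split <;> split <;> split <;> norm_num) (by norm_num) _ 8 (by norm_num)]
  rw [pvStep6 c _ s 4 (by split <;> split <;> split <;> split <;> norm_num) (by norm_num) _ 16
      (by norm_num)]
  rw [pvStep6 c _ s 5 (by split <;> split <;> split <;> split <;> split <;> norm_num)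
      (by norm_num) _ 32 (by norm_num)]
  have hv : pvEval w 0 P < 64 := pvEvalLt w P hG 0 (by omega)
  have hr : ∀ k : Nat, k < 6 → pvResolve w k false P.reverse = (pvEval w 0 P).testBit k := by
    intro k hk
    have h := pvEvalResolve w k hk P 0
    rw [Nat.zero_testBit] at h
    exact h.symm
  rw [hr 0 (by omega), hr 1 (by omega), hr 2 (by omega), hr 3 (by omega), hr 4 (by omega),
      hr 5 (by omega)]
  rw [pvBitsSum (pvEval w 0 P) hv]

-- ===== VERDICT (by name: the statement is the Claim_ definition above) =====
theorem build_perm_mask_py_spec : Claim_equal_build_perm_mask_py := by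
  intro clauses _ hpre
  unfold Spec_build_perm_mask_py
  obtain ⟨P, hG, hB, hA⟩ := pvMain clauses hpre 0 0 0 0 [] (by omega) (by omega) (by omega) (by omega)
  have h00 : pvPack 0 0 0 0 = 0 := by norm_num [pvPack]
  rw [h00] at hA
  unfold build_perm_mask_py build_perm_mask_py_alt
  rw [hA, hB]
  simp only [Option.getD_some, List.nil_append]
  have hitems : pvSetShift.items = [('p', 24), ('u', 16), ('g', 8), ('o', 0)] := by decide
  rw [hitems]
  simp only [List.foldl_cons, List.foldl_nil]
  rw [show (0 : Int) = ((0 * 2 ^ (24 + 6) : Nat) : Int) from by norm_num]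
  rw [pvInner 'p' 24 0 P hG]
  rw [show ((0 * 2 ^ (24 + 6) + pvEval 'p' 0 P * 2 ^ 24 : Nat) : Int)
        = (((pvEval 'p' 0 P * 4) * 2 ^ (16 + 6) : Nat) : Int)
      from congrArg (fun n : Nat => (n : Int)) (by norm_num; ring)]
  rw [pvInner 'u' 16 (pvEval 'p' 0 P * 4) P hG]
  rw [show (((pvEval 'p' 0 P * 4) * 2 ^ (16 + 6) + pvEval 'u' 0 P * 2 ^ 16 : Nat) : Int)
        = (((pvEval 'p' 0 P * 1024 + pvEval 'u' 0 P * 4) * 2 ^ (8 + 6) : Nat) : Int)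
      from congrArg (fun n : Nat => (n : Int)) (by norm_num; ring)]
  rw [pvInner 'g' 8 (pvEval 'p' 0 P * 1024 + pvEval 'u' 0 P * 4) P hG]
  rw [show (((pvEval 'p' 0 P * 1024 + pvEval 'u' 0 P * 4) * 2 ^ (8 + 6)
          + pvEval 'g' 0 P * 2 ^ 8 : Nat) : Int)
        = (((pvEval 'p' 0 P * 262144 + pvEval 'u' 0 P * 1024 + pvEval 'g' 0 P * 4)
            * 2 ^ (0 + 6) : Nat) : Int)
      from congrArg (fun n : Nat => (n : Int)) (by norm_num; ring)]
  rw [pvInner 'o' 0 (pvEval 'p' 0 P * 262144 + pvEval 'u' 0 P * 1024 + pvEval 'g' 0 P * 4) P hG]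
  refine congrArg (fun n : Nat => (n : Int)) ?_
  norm_num [pvPack]
  ring
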